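-- pv_equiv track=rewrite | github.com/AlmaLinux/albs-node | build_node/utils/rpm_utils.py | evrtofloat
-- ===== SOURCE A (Python) =====
-- def evrtofloat(rpm_data):
--     """
--     Encode List of Version or Epoch or Release in real-numbers segment.
--     See http://en.wikipedia.org/wiki/Arithmetic_coding.
--
--     Parameters
--     ----------
--     rpm_data : list of (string or str or int or long)
--         list to convert in double
--
--     Return
--     ----------
--     str
--         Converted string
--     """
--     evr = []
--     for elem in rpm_data:
--         if isinstance(elem, int):
--             evr.extend(int_to(elem))
--         elif isinstance(elem, str):
--             try:
--                 evr.extend(int_to(int(elem)))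
--             except ValueError:
--                 for ch in elem:
--                     evr.extend(char_to(ch))
--         else:
--             raise NameError('ThisStrange: ' + elem)
--         evr.extend(char_to(chr(0)))
--     return "".join(["%02x" % n for n in evr])
--
-- def int_to(intgr):
--     """
--     Encode int in real-numbers segment.
--     See http://en.wikipedia.org/wiki/Arithmetic_coding.
--
--     Parameters
--     ----------
--     intgr : int or long
--        int for coding in Float an segment [seg_begin, seg_end]
--
--     Return
--     ----------
--     tuple (Decimal, Decimal)
--         list encoding segment
--     """
--     lst = []
--     number = int(intgr)
--     while number > 0:
--         number, ost = divmod(number, 256)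
--         lst.append(ost)
--     lst.append(128 + len(lst))
--     lst.reverse()
--     return lst
--
-- def char_to(ch):
--     """
--     Encode char in real-numbers segment.
--     See http://en.wikipedia.org/wiki/Arithmetic_coding.
--
--     Parameters
--     ----------
--     ch : char
--         Char for coding in Float an segment [seg_begin, seg_end]
--
--     Return
--     ----------
--     list
--         list encoding segment
--     """
--     return [ord(ch)]
-- ===== SOURCE B (Python) =====
-- def evrtofloat(rpm_data):
--     out = []
--     for elem in rpm_data:
--         try:
--             n = int(elem)
--         except ValueError:
--             out.append(''.join('%02x' % ord(c) for c in elem))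
--         else:
--             if n > 0:
--                 b = n.to_bytes((n.bit_length() + 7) // 8, 'big')
--                 out.append('%02x' % (128 + len(b)) + b.hex())
--             else:
--                 out.append('80')
--         out.append('00')
--     return ''.join(out)
-- ===== Notes on version B (the rewrite author's own statement) =====
-- stated objective: idiomatic
-- what changed: B drops the intermediate evr byte list entirely: per element it emits one hex chunk directly, converting positive ints with a closed-form big-endian byte conversion (int.to_bytes + bytes.hex) instead of A's low-endian divmod loop followed by append-length and reverse, and joins the chunks once.
import Mathlib
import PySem

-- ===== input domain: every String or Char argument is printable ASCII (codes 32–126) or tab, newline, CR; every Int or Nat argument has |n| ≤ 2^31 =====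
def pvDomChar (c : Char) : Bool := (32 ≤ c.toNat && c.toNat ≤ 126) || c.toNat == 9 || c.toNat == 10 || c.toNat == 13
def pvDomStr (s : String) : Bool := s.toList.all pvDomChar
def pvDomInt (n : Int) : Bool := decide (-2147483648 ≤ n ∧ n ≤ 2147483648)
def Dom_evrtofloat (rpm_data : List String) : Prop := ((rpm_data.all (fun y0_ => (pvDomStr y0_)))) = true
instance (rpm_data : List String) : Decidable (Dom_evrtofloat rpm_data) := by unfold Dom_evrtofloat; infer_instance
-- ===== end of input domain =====

-- B inlines the encoding: per element it emits one hex chunk directly (closed-form big-endian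
-- byte conversion instead of A's low-endian divmod loop + append-length + reverse), then joins
-- the chunks; objective: simpler/idiomatic, no speed claim.

-- "%02x" % n — hex digits padded to width 2; exact for 0 ≤ n (the only values either program formats)
def hexByteChars (n : Int) : List Char :=
  let ds := Nat.toDigits 16 n.toNat
  List.replicate (2 - ds.length) '0' ++ ds

def hexByte (n : Int) : String := String.ofList (hexByteChars n)

-- ===== PORT A =====
def charTo (ch : Char) : List Int := [(ch.toNat : Int)]

-- `while number > 0: number, ost = divmod(number, 256); lst.append(ost)`
def intToLoop (number : Int) : List Int :=
  if h : 0 < number then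
    PySem.Int.mod number 256 :: intToLoop (PySem.Int.floordiv number 256)
  else []
termination_by number.toNat
decreasing_by
  rw [PySem.Int.floordiv_eq_ediv_of_pos (by norm_num : (0:Int) < 256)]
  omega

def intTo (intgr : Int) : List Int :=
  let lst := intToLoop intgr
  (lst ++ [128 + (lst.length : Int)]).reverse

def evrtofloat (rpm_data : List String) : String :=
  let evr := rpm_data.foldl (fun evr elem =>
    match PySem.Int.ofStr? elem with              -- `try: int(elem) except ValueError`
    | some n => (evr ++ intTo n) ++ charTo (Char.ofNat 0)
    | none => (elem.toList.foldl (fun e ch => e ++ charTo ch) evr) ++ charTo (Char.ofNat 0)) []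
  PySem.Str.join "" (evr.map hexByte)             -- "".join(["%02x" % n for n in evr])

-- ===== PORT B =====
-- n.to_bytes((n.bit_length()+7)//8, 'big') for n > 0: big-endian base-256 digits, no leading zero
def bytesBE (n : Int) : List Int :=
  if h : 0 < n then
    bytesBE (PySem.Int.floordiv n 256) ++ [PySem.Int.mod n 256]
  else []
termination_by n.toNat
decreasing_by
  rw [PySem.Int.floordiv_eq_ediv_of_pos (by norm_num : (0:Int) < 256)]
  omega

-- the hex chunk Source B appends for one element (before the '00' separator)
def elemChunk (elem : String) : List Char :=
  match PySem.Int.ofStr? elem with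
  | some n =>
    if 0 < n then
      hexByteChars (128 + ((bytesBE n).length : Int)) ++ ((bytesBE n).map hexByteChars).flatten
    else ['8', '0']
  | none => (elem.toList.map (fun c => hexByteChars (c.toNat : Int))).flatten

def evrtofloat_alt (rpm_data : List String) : String :=
  String.ofList ((rpm_data.map (fun elem => elemChunk elem ++ ['0', '0'])).flatten)

-- ===== PRECONDITION & SPEC =====
def Spec_evrtofloat (rpm_data : List String) (out : String) : Prop := out = evrtofloat_alt rpm_data
instance (rpm_data : List String) (out : String) : Decidable (Spec_evrtofloat rpm_data out) := by unfold Spec_evrtofloat; infer_instance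

-- ===== CLAIM (what is proved, stated in full; the proofs are below) =====
def Claim_equal_evrtofloat : Prop := ∀ (rpm_data : List String), Dom_evrtofloat rpm_data → Spec_evrtofloat rpm_data (evrtofloat rpm_data)

-- ===== LEMMAS AND PROOFS =====

theorem flatten_intersperse_nil (css : List (List Char)) :
    (List.intersperse ([] : List Char) css).flatten = css.flatten := by
  induction css with
  | nil => rfl
  | cons a t ih => cases t <;> simp_all [List.intersperse]

theorem chars_join_nil_sep (css : List (List Char)) :
    PySem.Chars.join [] css = css.flatten := by
  simp [PySem.Chars.join, List.intercalate, flatten_intersperse_nil]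

-- A's low-endian digit loop, reversed, is B's big-endian byte list
theorem intToLoop_reverse (n : Int) : (intToLoop n).reverse = bytesBE n := by
  induction n using intToLoop.induct with
  | case1 n h ih =>
    rw [intToLoop, dif_pos h, bytesBE, dif_pos h, List.reverse_cons, ih]
  | case2 n h =>
    rw [intToLoop, dif_neg h, bytesBE, dif_neg h]
    rfl

theorem hexByteChars_zero : hexByteChars ((Char.ofNat 0).toNat : Int) = ['0', '0'] := by decide

theorem hexByteChars_zero' : hexByteChars 0 = ['0', '0'] := by decide

theorem char_branch (cs : List Char) :
    ((cs.flatMap charTo).map hexByteChars).flatten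
      = (cs.map (fun c => hexByteChars (c.toNat : Int))).flatten := by
  induction cs with
  | nil => rfl
  | cons c t ih => simp [charTo, ih]

def encA (elem : String) : List Int :=
  (match PySem.Int.ofStr? elem with
   | some n => intTo n
   | none => elem.toList.flatMap charTo) ++ charTo (Char.ofNat 0)

-- per-element: A's contribution to evr, hex-mapped and flattened, is B's chunk plus separator
theorem elem_hex (elem : String) :
    ((encA elem).map hexByteChars).flatten = elemChunk elem ++ ['0', '0'] := by
  unfold encA elemChunk
  cases hp : PySem.Int.ofStr? elem with
  | none =>
    dsimp only
    simp only [List.map_append, List.flatten_append, char_branch, charTo,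
      List.map_cons, List.map_nil, List.flatten_cons, List.flatten_nil,
      hexByteChars_zero, List.append_nil]
  | some n =>
    dsimp only
    by_cases h : 0 < n
    · have hrev : intTo n = (128 + ((bytesBE n).length : Int)) :: bytesBE n := by
        unfold intTo
        rw [List.reverse_append, List.reverse_singleton]
        have hl : (intToLoop n).length = (bytesBE n).length := by
          rw [← intToLoop_reverse, List.length_reverse]
        simp [intToLoop_reverse, hl]
      rw [hrev, if_pos h]
      simp [charTo, hexByteChars_zero']
    · have hloop : intToLoop n = [] := by rw [intToLoop, dif_neg h]
      have hto : intTo n = [128] := by unfold intTo; rw [hloop]; rfl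
      rw [hto, if_neg h]
      decide

theorem hex_flatMap (l : List String) :
    ((l.flatMap encA).map hexByteChars).flatten
      = (l.map (fun e => elemChunk e ++ ['0', '0'])).flatten := by
  induction l with
  | nil => rfl
  | cons e t ih =>
    simp only [List.flatMap_cons, List.map_cons, List.map_append, List.flatten_cons,
      List.flatten_append, ih, elem_hex e]

-- ===== VERDICT (by name: the statement is the Claim_ definition above) =====
theorem evrtofloat_spec : Claim_equal_evrtofloat := by
  intro rpm_data _
  unfold Spec_evrtofloat evrtofloat evrtofloat_alt
  apply String.ext
  have hfn : (fun (evr : List Int) (elem : String) =>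
      match PySem.Int.ofStr? elem with
      | some n => (evr ++ intTo n) ++ charTo (Char.ofNat 0)
      | none => (elem.toList.foldl (fun e ch => e ++ charTo ch) evr) ++ charTo (Char.ofNat 0))
      = fun evr elem => evr ++ encA elem := by
    funext evr elem
    unfold encA
    cases PySem.Int.ofStr? elem with
    | some n => simp
    | none => simp [List.flatMap_def]
  rw [hfn, PySem.List.foldl_append_eq_flatMap encA rpm_data [], List.nil_append,
    PySem.Str.toList_join]
  have hsep : ("" : String).toList = ([] : List Char) := by decide
  have hhex : ∀ n : Int, (hexByte n).toList = hexByteChars n := by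
    intro n; simp [hexByte]
  rw [hsep, chars_join_nil_sep]
  simp only [List.map_map, Function.comp_def, hhex, hex_flatMap]
  simp
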